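-- pv_equiv track=rewrite | github.com/drmikehenry/findx | findx.py | quoted_split
-- ===== SOURCE A (Python) =====
-- def strepr(s):
--     """repr(s) without the leading "u" for Python 2 Unicode strings."""
--     return repr(s).lstrip('u')
--
-- def quoted_split(value):
--     args = []
--     quote = ''
--     bslash_count = 0
--     this_arg = []
--
--     def keep(c):
--         this_arg.append(c)
--
--     def finish_arg():
--         if this_arg:
--             args.append(''.join(this_arg))
--             this_arg[:] = []
--
--     for c in value:
--         if c == '\\':
--             bslash_count += 1
--         else:
--             if bslash_count:
--                 if quote == "'":
--                     special = False
--                 elif quote == '"':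
--                     special = (c == '"')
--                 else:
--                     special = (c.isspace() or c in ['"', "'"])
--                 if special:
--                     keep('\\' * (bslash_count // 2))
--                     bslash_count = bslash_count % 2
--                 else:
--                     keep('\\' * bslash_count)
--                     bslash_count = 0
--             if bslash_count:
--                 keep(c)
--                 bslash_count = 0
--             elif c == quote:
--                 quote = ''
--             elif quote:
--                 keep(c)
--             elif c in ['"', "'"]:
--                 quote = c
--                 # Keep an empty string to ensure we're in an arg.
--                 keep('')
--             elif c.isspace():
--                 finish_arg()
--             else:
--                 keep(c)
--     if bslash_count:
--         keep('\\' * bslash_count)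
--     if quote:
--         raise ValueError('No closing quotation in %s' % strepr(value))
--     finish_arg()
--     return args
-- ===== SOURCE B (Python) =====
-- def strepr(s):
--     """repr(s) without the leading "u" for Python 2 Unicode strings."""
--     return repr(s).lstrip('u')
--
-- def quoted_split(value):
--     args = []
--     quote = ''
--     cur = []          # chars of the argument being built
--     started = False
--     n = len(value)
--     i = 0
--     while i < n:
--         c = value[i]
--         if c == '\\':
--             # consume the whole run of consecutive backslashes
--             j = i
--             while j < n and value[j] == '\\':
--                 j += 1
--             count = j - i
--             i = j
--             if i == n:
--                 cur.extend('\\' * count)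
--                 started = True
--                 break
--             c = value[i]
--             if quote == "'":
--                 special = False
--             elif quote == '"':
--                 special = (c == '"')
--             else:
--                 special = c.isspace() or c == '"' or c == "'"
--             if special:
--                 cur.extend('\\' * (count // 2))
--                 started = True
--                 if count % 2:
--                     cur.append(c)
--                     i += 1
--                     continue
--             else:
--                 cur.extend('\\' * count)
--                 started = True
--         if c == quote:
--             quote = ''
--         elif quote:
--             cur.append(c)
--             started = True
--         elif c == '"' or c == "'":
--             quote = c
--             started = True
--         elif c.isspace():
--             if started:
--                 args.append(''.join(cur))
--                 cur = []
--                 started = False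
--         else:
--             cur.append(c)
--             started = True
--         i += 1
--     if quote:
--         raise ValueError('No closing quotation in %s' % strepr(value))
--     if started:
--         args.append(''.join(cur))
--     return args
-- ===== Notes on version B (the rewrite author's own statement) =====
-- stated objective: alternative
-- what changed: B replaces A's char-by-char state machine (which carries a bslash_count and a piece-list this_arg across iterations) with an index-based scan that consumes each backslash run in one inner loop and decides the escape in place, keeping the current argument as a plain string plus a started flag.
import Mathlib
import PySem

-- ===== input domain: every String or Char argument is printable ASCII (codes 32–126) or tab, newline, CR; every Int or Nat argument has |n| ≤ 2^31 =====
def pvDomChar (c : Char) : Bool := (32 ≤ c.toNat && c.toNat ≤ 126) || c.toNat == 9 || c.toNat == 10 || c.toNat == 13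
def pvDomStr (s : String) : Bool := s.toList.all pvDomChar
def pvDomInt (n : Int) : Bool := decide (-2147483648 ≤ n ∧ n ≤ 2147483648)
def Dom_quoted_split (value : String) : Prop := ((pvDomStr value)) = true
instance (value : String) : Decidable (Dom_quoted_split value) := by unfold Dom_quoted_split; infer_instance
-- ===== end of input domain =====

-- B re-decomposes A's char-by-char escape state machine as an index scan that consumes each
-- backslash run at once (no bslash_count carried across iterations) and keeps the current arg
-- as a string + started flag instead of a piece list; same return value wherever A returns.

-- ===== PORT A =====
-- A's loop state: (args, quote, bslash_count, this_arg);  this_arg is the list of kept pieces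
-- (''.join at finish_arg), quote '' / '"' / "'" is ported as Option Char.
def pvStateA : Type := List (List Char) × Option Char × Nat × List (List Char)

def pvFinishA (args : List (List Char)) (ta : List (List Char)) :
    List (List Char) × List (List Char) :=
  if ta = [] then (args, ta) else (args ++ [ta.flatten], [])

def pvStepA (st : pvStateA) (c : Char) : pvStateA :=
  let (args, quote, bc, ta) := st
  if c = '\\' then (args, quote, bc + 1, ta)
  else
    let (ta₁, bc₁) :=
      if bc ≠ 0 then
        let special :=
          if quote = some '\'' then false
          else if quote = some '"' then c = '"'
          else (PySem.Chars.isspace c || c = '"' || c = '\'')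
        if special then (ta ++ [List.replicate (bc / 2) '\\'], bc % 2)
        else (ta ++ [List.replicate bc '\\'], 0)
      else (ta, bc)
    if bc₁ ≠ 0 then (args, quote, 0, ta₁ ++ [[c]])
    else if some c = quote then (args, none, 0, ta₁)
    else if quote.isSome then (args, quote, 0, ta₁ ++ [[c]])
    else if c = '"' ∨ c = '\'' then (args, some c, 0, ta₁ ++ [[]])
    else if PySem.Chars.isspace c then
      let (args₂, ta₂) := pvFinishA args ta₁
      (args₂, quote, 0, ta₂)
    else (args, quote, 0, ta₁ ++ [[c]])

def quoted_split (value : String) : List String :=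
  let st := value.toList.foldl pvStepA ([], none, 0, [])
  let (args, _quote, bc, ta) := st
  let ta₁ := if bc ≠ 0 then ta ++ [List.replicate bc '\\'] else ta
  -- Python raises ValueError here when a quote is left open (excluded by Pre_);
  -- the port just returns the finished arg list.
  let (args₁, _) := pvFinishA args ta₁
  args₁.map (fun cs => String.ofList cs)

-- ===== PORT B =====
-- the shared tail of B's loop body: process one ordinary (not backslash-grouped) char
def pvStepB (c : Char) (args : List (List Char)) (quote : Option Char) (cur : List Char)
    (started : Bool) : List (List Char) × Option Char × List Char × Bool :=
  if some c = quote then (args, none, cur, started)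
  else if quote.isSome then (args, quote, cur ++ [c], true)
  else if c = '"' ∨ c = '\'' then (args, some c, cur, true)
  else if PySem.Chars.isspace c then
    if started then (args ++ [cur], quote, [], false) else (args, quote, cur, started)
  else (args, quote, cur ++ [c], true)

def pvGoB (l : List Char) (args : List (List Char)) (quote : Option Char) (cur : List Char)
    (started : Bool) : List (List Char) :=
  match h : l with
  | [] => if started then args ++ [cur] else args
  | c :: cs =>
    if hc : c = '\\' then
      let count := (l.takeWhile (· = '\\')).length
      match hr : l.dropWhile (· = '\\') with
      | [] => args ++ [cur ++ List.replicate count '\\']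
      | c' :: cs' =>
        let special :=
          if quote = some '\'' then false
          else if quote = some '"' then c' = '"'
          else (PySem.Chars.isspace c' || c' = '"' || c' = '\'')
        if special ∧ count % 2 = 1 then
          pvGoB cs' args quote (cur ++ List.replicate (count / 2) '\\' ++ [c']) true
        else
          let cur₁ := if special then cur ++ List.replicate (count / 2) '\\'
                      else cur ++ List.replicate count '\\'
          let (args₂, quote₂, cur₂, started₂) := pvStepB c' args quote cur₁ true
          pvGoB cs' args₂ quote₂ cur₂ started₂
    else
      let (args₂, quote₂, cur₂, started₂) := pvStepB c args quote cur started
      pvGoB cs args₂ quote₂ cur₂ started₂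
termination_by l.length
decreasing_by
  · subst h
    have h1 := List.length_dropWhile_le (fun x => decide (x = '\\')) (c :: cs)
    rw [hr] at h1; simp at h1 ⊢; omega
  · subst h
    have h1 := List.length_dropWhile_le (fun x => decide (x = '\\')) (c :: cs)
    rw [hr] at h1; simp at h1 ⊢; omega
  · simp

def quoted_split_alt (value : String) : List String :=
  -- B raises the same ValueError on an unclosed quote (excluded by Pre_).
  (pvGoB value.toList [] none [] false).map (fun cs => String.ofList cs)

-- ===== PRECONDITION & SPEC =====
-- Pre_ excludes exactly the inputs that end with an unclosed quote, where Python A raises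
-- ValueError (and B raises the same); the fold below is the minimal quote/escape-parity
-- automaton describing that set, not a copy of either algorithm (it builds no output).
def pvPreStep (st : Option Char × Bool) (c : Char) : Option Char × Bool :=
  let (q, par) := st
  if c = '\\' then (q, !par)
  else
    let special :=
      if q = some '\'' then false
      else if q = some '"' then c = '"'
      else (PySem.Chars.isspace c || c = '"' || c = '\'')
    if par && special then (q, false)
    else if some c = q then (none, false)
    else if q.isSome then (q, false)
    else if c = '"' ∨ c = '\'' then (some c, false)
    else (q, false)

def Pre_quoted_split (value : String) : Prop :=
  (value.toList.foldl pvPreStep (none, false)).1 = none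
instance (value : String) : Decidable (Pre_quoted_split value) := by
  unfold Pre_quoted_split; infer_instance

def pvWitness_quoted_split : String := "a 'b  c' \\\"d"

def Spec_quoted_split (value : String) (out : List String) : Prop := out = quoted_split_alt value
instance (value : String) (out : List String) : Decidable (Spec_quoted_split value out) := by unfold Spec_quoted_split; infer_instance

-- ===== CLAIM (what is proved, stated in full; the proofs are below) =====
def Claim_equal_quoted_split : Prop := ∀ (value : String), Dom_quoted_split value → Pre_quoted_split value → Spec_quoted_split value (quoted_split value)

-- ===== LEMMAS AND PROOFS =====

-- A's finalization (trailing backslashes, then finish_arg), applied to A's loop state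
def pvFinA (st : pvStateA) : List (List Char) :=
  match st with
  | (args, _q, bc, ta) =>
    (pvFinishA args (if bc ≠ 0 then ta ++ [List.replicate bc '\\'] else ta)).1

lemma pv_quoted_split_eq (value : String) :
    quoted_split value
      = (pvFinA (value.toList.foldl pvStepA ([], none, 0, []))).map String.ofList := by
  unfold quoted_split pvFinA
  rcases value.toList.foldl pvStepA ([], none, 0, []) with ⟨args, q, bc, ta⟩
  rcases h : pvFinishA args (if bc ≠ 0 then ta ++ [List.replicate bc '\\'] else ta) with ⟨a, t⟩
  simp

-- A's loop over a run of backslashes only increments bslash_count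
lemma pv_fold_bslash (k : Nat) (args : List (List Char)) (q : Option Char) (bc : Nat)
    (ta : List (List Char)) :
    (List.replicate k '\\').foldl pvStepA (args, q, bc, ta) = (args, q, bc + k, ta) := by
  induction k generalizing bc with
  | zero => simp
  | succ n ih =>
    rw [List.replicate_succ, List.foldl_cons]
    show (List.replicate n '\\').foldl pvStepA (pvStepA (args, q, bc, ta) '\\') = _
    rw [show pvStepA (args, q, bc, ta) '\\' = (args, q, bc + 1, ta) by simp [pvStepA]]
    rw [ih, show bc + 1 + n = bc + (n + 1) from by omega]

-- one ordinary (non-backslash, bslash_count = 0) step of A corresponds to pvStepB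
lemma pv_norm_step (c : Char) (hc : c ≠ '\\') (args : List (List Char)) (q : Option Char)
    (ta : List (List Char)) :
    ∃ args₂ q₂ ta₂,
      pvStepA (args, q, 0, ta) c = (args₂, q₂, 0, ta₂) ∧
      pvStepB c args q ta.flatten (!ta.isEmpty) = (args₂, q₂, ta₂.flatten, !ta₂.isEmpty) := by
  unfold pvStepA pvStepB pvFinishA
  simp only [if_neg hc]
  by_cases h1 : some c = q
  · exact ⟨args, none, ta, by simp [h1], by simp [h1]⟩
  · by_cases h2 : q.isSome
    · exact ⟨args, q, ta ++ [[c]], by simp [h1, h2], by simp [h1, h2]⟩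
    · by_cases h3 : c = '"' ∨ c = '\''
      · exact ⟨args, some c, ta ++ [[]], by simp [h1, h2, h3], by simp [h1, h2, h3]⟩
      · by_cases h4 : PySem.Chars.isspace c
        · by_cases h5 : ta = []
          · exact ⟨args, q, ta, by simp [h1, h2, h3, h4, h5], by simp [h1, h2, h3, h4, h5]⟩
          · exact ⟨args ++ [ta.flatten], q, [], by simp [h1, h2, h3, h4, h5],
              by simp [h1, h2, h3, h4, h5]⟩
        · exact ⟨args, q, ta ++ [[c]], by simp [h1, h2, h3, h4], by simp [h1, h2, h3, h4]⟩

-- a step of A on a non-backslash char with pending backslashes, in terms of bc = 0 steps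
lemma pv_step_pending (c : Char) (hc : c ≠ '\\') (args : List (List Char)) (q : Option Char)
    (bc : Nat) (hbc : bc ≠ 0) (ta : List (List Char)) :
    pvStepA (args, q, bc, ta) c =
      (if (if q = some '\'' then false
           else if q = some '"' then decide (c = '"')
           else (PySem.Chars.isspace c || c = '"' || c = '\'')) then
        (if bc % 2 = 1 then (args, q, 0, (ta ++ [List.replicate (bc / 2) '\\']) ++ [[c]])
         else pvStepA (args, q, 0, ta ++ [List.replicate (bc / 2) '\\']) c)
       else pvStepA (args, q, 0, ta ++ [List.replicate bc '\\']) c) := by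
  by_cases hs : (if q = some '\'' then false
           else if q = some '"' then decide (c = '"')
           else (PySem.Chars.isspace c || c = '"' || c = '\'')) = true
  · by_cases hp : bc % 2 = 1
    · simp only [hs, if_true, hp]
      unfold pvStepA
      simp [hc, hbc, hs, hp]
    · have hp0 : bc % 2 = 0 := by omega
      simp only [hs, if_true, hp]
      conv_lhs => unfold pvStepA
      conv_rhs => unfold pvStepA
      simp [hc, hbc, hs, hp0]
  · simp only [hs]
    conv_lhs => unfold pvStepA
    conv_rhs => unfold pvStepA
    simp [hc, hbc, hs]

lemma pv_isEmpty_append (ta xs : List (List Char)) (h : xs ≠ []) : (ta ++ xs).isEmpty = false := by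
  cases ta <;> cases xs <;> simp_all [List.isEmpty]

lemma pvGoB_bslash_cons (cs : List Char) (c' : Char) (cs' : List Char)
    (hr : ('\\' :: cs).dropWhile (fun x => decide (x = '\\')) = c' :: cs')
    (args : List (List Char)) (q : Option Char) (cur : List Char) (started : Bool) :
    pvGoB ('\\' :: cs) args q cur started =
      (let count := (('\\' :: cs).takeWhile (fun x => decide (x = '\\'))).length
       let special := if q = some '\'' then false
         else if q = some '"' then decide (c' = '"')
         else (PySem.Chars.isspace c' || c' = '"' || c' = '\'')
       if special ∧ count % 2 = 1 then
         pvGoB cs' args q (cur ++ List.replicate (count / 2) '\\' ++ [c']) true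
       else
         let cur₁ := if special then cur ++ List.replicate (count / 2) '\\'
                     else cur ++ List.replicate count '\\'
         let (args₂, quote₂, cur₂, started₂) := pvStepB c' args q cur₁ true
         pvGoB cs' args₂ quote₂ cur₂ started₂) := by
  conv_lhs => unfold pvGoB
  split
  · split
    · next heq => rw [hr] at heq; cases heq
    · next c'' cs'' heq =>
      rw [hr] at heq
      injection heq with h1 h2
      subst h1; subst h2
      rfl
  · next h => exact absurd rfl h

lemma pv_main : ∀ (n : Nat) (l : List Char), l.length = n →
    ∀ (args : List (List Char)) (q : Option Char) (ta : List (List Char)),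
      pvFinA (l.foldl pvStepA (args, q, 0, ta)) = pvGoB l args q ta.flatten (!ta.isEmpty) := by
  intro n
  induction n using Nat.strong_induction_on with
  | _ n ih =>
    intro l hl args q ta
    rcases l with _ | ⟨c, cs⟩
    · unfold pvGoB pvFinA pvFinishA
      by_cases h : ta = [] <;> simp [h]
    · by_cases hc : c = '\\'
      · subst hc
        have hrun_cons : ('\\' :: cs).takeWhile (fun x => decide (x = '\\')) =
            '\\' :: cs.takeWhile (fun x => decide (x = '\\')) := by
          rw [List.takeWhile_cons_of_pos] ; simp
        have hrest_eq : ('\\' :: cs).dropWhile (fun x => decide (x = '\\')) =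
            cs.dropWhile (fun x => decide (x = '\\')) := by
          rw [List.dropWhile_cons_of_pos] ; simp
        have hrep : ('\\' :: cs).takeWhile (fun x => decide (x = '\\')) =
            List.replicate (('\\' :: cs).takeWhile (fun x => decide (x = '\\'))).length '\\' :=
          List.eq_replicate_of_mem (fun x hx => by simpa using List.mem_takeWhile_imp hx)
        have hcnt : (('\\' :: cs).takeWhile (fun x => decide (x = '\\'))).length ≠ 0 := by
          rw [hrun_cons]; simp
        have hfold : ('\\' :: cs).foldl pvStepA (args, q, 0, ta) =
            (('\\' :: cs).dropWhile (fun x => decide (x = '\\'))).foldl pvStepA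
              (args, q, (('\\' :: cs).takeWhile (fun x => decide (x = '\\'))).length, ta) := by
          conv_lhs => rw [← List.takeWhile_append_dropWhile
            (p := fun x => decide (x = '\\')) (l := '\\' :: cs)]
          rw [List.foldl_append]
          conv_lhs => rw [hrep]
          rw [pv_fold_bslash]
          simp
        rcases hr : ('\\' :: cs).dropWhile (fun x => decide (x = '\\')) with _ | ⟨c', cs'⟩
        · rw [hfold, hr, List.foldl_nil]
          simp only [pvFinA]
          rw [if_pos hcnt]
          simp only [pvFinishA]
          rw [if_neg (by simp)]
          conv_rhs => unfold pvGoB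
          split
          · split
            · simp [List.flatten_append]
            · next c' cs' heq => rw [hr] at heq; cases heq
          · next h => exact absurd rfl h
        · have hc' : ¬ (c' = '\\') := by
            have := List.head?_dropWhile_not (fun x => decide (x = '\\')) ('\\' :: cs)
            rw [hr] at this; simpa using this
          have hlen : cs'.length < n := by
            have h1 := List.length_dropWhile_le (fun x => decide (x = '\\')) ('\\' :: cs)
            rw [hr] at h1
            rw [← hl]
            simp at h1 ⊢
            omega
          rw [hfold, hr, List.foldl_cons,
            pv_step_pending c' hc' args q _ hcnt ta,
            pvGoB_bslash_cons cs c' cs' hr]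
          by_cases hs : (if q = some '\'' then false
              else if q = some '"' then decide (c' = '"')
              else (PySem.Chars.isspace c' || c' = '"' || c' = '\'')) = true
          · by_cases hp : (('\\' :: cs).takeWhile (fun x => decide (x = '\\'))).length % 2 = 1
            · rw [if_pos hs, if_pos hp, ih cs'.length hlen cs' rfl]
              have hp' := hp
              simp only [hrun_cons, List.length_cons] at hp'
              simp [hs, hp', List.flatten_append, pv_isEmpty_append]
            · rw [if_pos hs, if_neg hp]
              obtain ⟨args₂, q₂, ta₂, hA, hB⟩ := pv_norm_step c' hc' args q
                (ta ++ [List.replicate ((('\\' :: cs).takeWhile (fun x => decide (x = '\\'))).length / 2) '\\'])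
              rw [hA, ih cs'.length hlen cs' rfl]
              have hb2 : pvStepB c' args q
                  (ta.flatten ++ List.replicate ((('\\' :: cs).takeWhile (fun x => decide (x = '\\'))).length / 2) '\\') true
                  = (args₂, q₂, ta₂.flatten, !ta₂.isEmpty) := by
                rw [← hB]; simp [List.flatten_append, pv_isEmpty_append]
              have hp' := hp
              simp only [hrun_cons, List.length_cons] at hp'
              simp only [hrun_cons, List.length_cons] at hb2
              simp [hs, hp', hb2]
          · rw [if_neg hs]
            obtain ⟨args₂, q₂, ta₂, hA, hB⟩ := pv_norm_step c' hc' args q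
              (ta ++ [List.replicate (('\\' :: cs).takeWhile (fun x => decide (x = '\\'))).length '\\'])
            rw [hA, ih cs'.length hlen cs' rfl]
            have hb2 : pvStepB c' args q
                (ta.flatten ++ List.replicate (('\\' :: cs).takeWhile (fun x => decide (x = '\\'))).length '\\') true
                = (args₂, q₂, ta₂.flatten, !ta₂.isEmpty) := by
              rw [← hB]; simp [List.flatten_append, pv_isEmpty_append]
            simp only [hrun_cons, List.length_cons] at hb2
            simp [hs, hb2]
      · rw [List.foldl_cons]
        obtain ⟨args₂, q₂, ta₂, hA, hB⟩ := pv_norm_step c hc args q ta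
        rw [hA]
        have hlen : cs.length < n := by rw [← hl]; simp
        rw [ih cs.length hlen cs rfl args₂ q₂ ta₂]
        conv_rhs => unfold pvGoB
        simp [hc, hB]

-- ===== VERDICT (by name: the statement is the Claim_ definition above) =====
theorem quoted_split_spec : Claim_equal_quoted_split := by
  intro value _ _
  show quoted_split value = quoted_split_alt value
  rw [pv_quoted_split_eq]
  unfold quoted_split_alt
  rw [pv_main value.toList.length value.toList rfl [] none []]
  simp
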